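-- pv_equiv track=rewrite | github.com/hyeon-jeong/coding_study | 공통문제/week_16/미현.py | solution
-- ===== SOURCE A (Python) =====
-- def solution(food_times, k):
--     times = {} # 시간에 순서 매칭
--     for i, time in enumerate(food_times):
--         if time in times:
--             times[time].append(i)
--         else:
--             times[time] = [i]
--     l = len(food_times)
--
--     threshold = 0 # 최소 몇바퀴 돌 수 있는지
--
--     for time in sorted(times):
--         if k - (time - threshold)*l >= 0:
--             k -= (time - threshold)*l
--             l -= len(times[time])
--             threshold += (time - threshold)
--         else:
--             k = k % l
--             for i in times:
--                 if i >= time: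
--                     idex = times[i][0]
--                     break
--
--             for i in range(idex, len(food_times)):
--                 if food_times[i] >= time:
--                     if k == 0:
--                         return i+1
--                     k -= 1
--     return -1
-- ===== SOURCE B (Python) =====
-- def solution(food_times, k):
--     # Single sorted pass over individual plates (indices sorted by eating time)
--     # instead of A's dict-of-groups plus rescan of food_times.
--     plates = sorted(range(len(food_times)), key=lambda i: food_times[i])
--     prev = 0
--     remaining = len(food_times)
--     for pos, i in enumerate(plates):
--         t = food_times[i]
--         need = (t - prev) * remaining
--         if k < need:
--             rest = sorted(plates[pos:])
--             return rest[k % remaining] + 1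
--         k -= need
--         prev = t
--         remaining -= 1
--     return -1
-- ===== Notes on version B (the rewrite author's own statement) =====
-- stated objective: simpler
-- what changed: Replaces A's dict-of-time-groups (grouping by value, iterating sorted distinct times, then finding a start index through dict insertion order and rescanning food_times) by one sorted list of plate indices walked once, with the answer taken directly from the sorted remaining suffix.
import Mathlib
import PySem

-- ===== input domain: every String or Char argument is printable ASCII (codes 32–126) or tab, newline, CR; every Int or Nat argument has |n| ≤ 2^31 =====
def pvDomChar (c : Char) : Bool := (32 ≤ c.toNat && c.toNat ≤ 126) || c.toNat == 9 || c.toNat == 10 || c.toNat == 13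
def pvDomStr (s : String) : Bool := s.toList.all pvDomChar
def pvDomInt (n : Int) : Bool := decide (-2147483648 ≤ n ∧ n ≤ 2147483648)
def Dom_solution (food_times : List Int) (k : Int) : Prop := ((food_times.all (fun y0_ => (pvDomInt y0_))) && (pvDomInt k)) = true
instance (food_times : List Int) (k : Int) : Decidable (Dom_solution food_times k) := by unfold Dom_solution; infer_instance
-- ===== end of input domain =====

-- B replaces A's dict-of-time-groups (plus a rescan of food_times through dict insertion
-- order) by a single sorted list of plate indices walked once: simpler, same result.

-- ===== PORT A =====
-- times = {}; for i, time in enumerate(food_times): group index i under key time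
def pvBuildA (food_times : List Int) : PySem.Dict Int (List Int) :=
  (PySem.List.enumerate food_times).foldl
    (fun d p => if d.contains p.2 then d.modify p.2 [] (· ++ [p.1]) else d.insert p.2 [p.1])
    PySem.Dict.empty

-- 'for i in range(idex, len(food_times)): if food_times[i] >= time: …' with early return;
-- returns (early result?, mutated k).  food_times[i] is in range here, so pyGetD is exact.
def pvInnerA (food_times : List Int) (time : Int) : List Int → Int → Option Int × Int
  | [], k => (none, k)
  | i :: rest, k =>
    if time ≤ PySem.List.pyGetD food_times i 0 then
      if k = 0 then (some (i + 1), k)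
      else pvInnerA food_times time rest (k - 1)
    else pvInnerA food_times time rest k

-- 'for time in sorted(times): …'
def pvOuterA (food_times : List Int) (times : PySem.Dict Int (List Int)) :
    List Int → Int → Int → Int → Int
  | [], _, _, _ => -1
  | time :: restKeys, k, l, threshold =>
    if 0 ≤ k - (time - threshold) * l then
      pvOuterA food_times times restKeys (k - (time - threshold) * l)
        (l - ((times.getD time []).length : Int)) (threshold + (time - threshold))
    else
      let k' := PySem.Int.mod k l
      -- 'for i in times: if i >= time: idex = times[i][0]; break'
      -- (the find always succeeds — time itself is a key — so the defaults are never used)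
      let idex := ((times.keys.find? (fun v => decide (time ≤ v))).map
        (fun u => (PySem.List.pyGet? (times.getD u []) 0).getD 0)).getD 0
      match pvInnerA food_times time (PySem.List.pyRange idex (food_times.length : Int)) k' with
      | (some r, _) => r
      | (none, k'') => pvOuterA food_times times restKeys k'' l threshold

def solution (food_times : List Int) (k : Int) : Int :=
  let times := pvBuildA food_times
  pvOuterA food_times times (PySem.List.sorted times.keys (fun x => x)) k
    (food_times.length : Int) 0

-- ===== PORT B =====
-- 'for pos, i in enumerate(plates): …' with the current suffix plates[pos:] as the list
-- and remaining = len(plates) - pos carried along; list indexing is in range, pyGetD exact.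
def pvLoopB (food_times : List Int) : List Int → Int → Int → Int → Int
  | [], _, _, _ => -1
  | i :: rest, prev, remaining, k =>
    let t := PySem.List.pyGetD food_times i 0
    let need := (t - prev) * remaining
    if k < need then
      PySem.List.pyGetD (PySem.List.sorted (i :: rest) (fun x => x))
        (PySem.Int.mod k remaining) 0 + 1
    else pvLoopB food_times rest t (remaining - 1) (k - need)

def solution_alt (food_times : List Int) (k : Int) : Int :=
  pvLoopB food_times
    (PySem.List.sorted (PySem.List.pyRange 0 (food_times.length : Int))
      (fun i => PySem.List.pyGetD food_times i 0))
    0 (food_times.length : Int) k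

-- ===== PRECONDITION & SPEC =====
def Spec_solution (food_times : List Int) (k : Int) (out : Int) : Prop := out = solution_alt food_times k
instance (food_times : List Int) (k : Int) (out : Int) : Decidable (Spec_solution food_times k out) := by unfold Spec_solution; infer_instance

-- ===== CLAIM (what is proved, stated in full; the proofs are below) =====
def Claim_equal_solution : Prop := ∀ (food_times : List Int) (k : Int), Dom_solution food_times k → Spec_solution food_times k (solution food_times k)

-- ===== LEMMAS AND PROOFS =====

def pvOcc (fs : List Int) (t : Int) : List Int :=
  ((PySem.List.enumerate fs).filter (fun p => p.2 == t)).map (fun p => p.1)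

lemma pyGetD_valid {fs : List Int} {i : Int} (h0 : 0 ≤ i) (h1 : i < (fs.length : Int)) :
    PySem.List.pyGetD fs i 0 = fs[i.toNat]'(by omega) := by
  rw [PySem.List.pyGetD_of_nonneg _ _ h0]
  rw [List.getD_eq_getElem?_getD, List.getElem?_eq_getElem (by omega)]
  rfl

lemma mem_pvOcc {fs : List Int} {t i : Int} :
    i ∈ pvOcc fs t ↔ 0 ≤ i ∧ i < (fs.length : Int) ∧ PySem.List.pyGetD fs i 0 = t := by
  unfold pvOcc
  simp only [List.mem_map, List.mem_filter, PySem.List.mem_enumerate_iff]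
  constructor
  · rintro ⟨p, ⟨⟨m, hm, rfl⟩, ht⟩, rfl⟩
    simp only [zero_add, beq_iff_eq] at ht ⊢
    refine ⟨by positivity, by exact_mod_cast hm, ?_⟩
    rw [pyGetD_valid (by positivity) (by exact_mod_cast hm)]
    simpa using ht
  · rintro ⟨h0, h1, ht⟩
    refine ⟨(i, PySem.List.pyGetD fs i 0), ⟨⟨i.toNat, by omega, ?_⟩, by simp [ht]⟩, rfl⟩
    rw [pyGetD_valid h0 h1]
    simp only [zero_add]
    congr 1
    omega

lemma pvOcc_pairwise (fs : List Int) (t : Int) : (pvOcc fs t).Pairwise (· < ·) := by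
  unfold pvOcc
  refine List.Pairwise.map _ (fun a b h => h) ?_
  exact (PySem.List.pairwise_lt_enumerate fs 0).sublist List.filter_sublist

lemma pvOcc_ne_nil {fs : List Int} {t : Int} (h : t ∈ fs) : pvOcc fs t ≠ [] := by
  obtain ⟨m, hm, rfl⟩ := List.mem_iff_getElem.mp h
  have : (m : Int) ∈ pvOcc fs fs[m] := by
    rw [mem_pvOcc]
    refine ⟨by positivity, by exact_mod_cast hm, ?_⟩
    rw [pyGetD_valid (by positivity) (by exact_mod_cast hm)]
    simp
  exact List.ne_nil_of_mem this

lemma pvBuild_step (d : PySem.Dict Int (List Int)) (p : Int × Int) :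
    (if d.contains p.2 then d.modify p.2 [] (· ++ [p.1]) else d.insert p.2 [p.1]) =
      d.modify p.2 [] (· ++ [p.1]) := by
  by_cases h : d.contains p.2
  · simp [h]
  · simp only [h, PySem.Dict.modify]
    rw [PySem.Dict.getD_of_not_contains _ _ (by simpa using h)]
    rfl

lemma pvBuildA_eq (fs : List Int) :
    pvBuildA fs = ((PySem.List.enumerate fs).map (fun p => (p.2, p.1))).foldl
      (fun d q => d.modify q.1 [] (· ++ [q.2])) PySem.Dict.empty := by
  unfold pvBuildA
  rw [List.foldl_map]
  exact PySem.List.foldl_congr_mem _ _ _ _ (fun acc x _ => pvBuild_step acc x)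

lemma pvBuildA_getD (fs : List Int) (t : Int) : (pvBuildA fs).getD t [] = pvOcc fs t := by
  rw [pvBuildA_eq, PySem.Dict.getD_foldl_modify_append]
  unfold pvOcc
  simp [List.filter_map, Function.comp_def]

lemma pvBuildA_keys (fs : List Int) : (pvBuildA fs).keys = PySem.Set.ofList fs := by
  rw [pvBuildA_eq]
  have h := PySem.Dict.keys_foldl_modify_key
      ((PySem.List.enumerate fs).map (fun p => (p.2, p.1)))
      (fun q : Int × Int => q.1) ([] : List Int)
      (fun _ q => (· ++ [q.2])) PySem.Dict.empty
  rw [h]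
  simp only [List.map_map]
  have : ((PySem.List.enumerate fs).map ((fun q => q.1) ∘ (fun p => (p.2, p.1)))) = fs := by
    simp only [Function.comp_def]
    exact PySem.List.map_snd_enumerate fs 0
  rw [this, PySem.Dict.keys_empty]
  rfl

lemma pvOcc_append (fs : List Int) (x t : Int) :
    pvOcc (fs ++ [x]) t = pvOcc fs t ++ (if x == t then [(fs.length : Int)] else []) := by
  unfold pvOcc
  rw [PySem.List.enumerate_append]
  simp only [List.filter_append, List.map_append]
  congr 1
  have : PySem.List.enumerate [x] (0 + (fs.length : Int)) = [((fs.length : Int), x)] := by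
    simp [PySem.List.enumerate_cons, PySem.List.enumerate_nil]
  rw [this]
  by_cases hx : x == t <;> simp_all

lemma headD_mem {l : List Int} (h : l ≠ []) : l.headD 0 ∈ l := by
  cases l with
  | nil => simp at h
  | cons a t => simp

lemma pvOcc_bounds {fs : List Int} {t i : Int} (h : i ∈ pvOcc fs t) :
    0 ≤ i ∧ i < (fs.length : Int) := by
  have := mem_pvOcc.mp h
  exact ⟨this.1, this.2.1⟩

lemma pyGetD_mem {fs : List Int} {i : Int} (h0 : 0 ≤ i) (h1 : i < (fs.length : Int)) :
    PySem.List.pyGetD fs i 0 ∈ fs := by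
  rw [pyGetD_valid h0 h1]
  exact List.getElem_mem _

lemma ofList_pairwise_headOcc (fs : List Int) :
    (PySem.Set.ofList fs).Pairwise
      (fun a b => (pvOcc fs a).headD 0 < (pvOcc fs b).headD 0) := by
  induction fs using List.reverseRecOn with
  | nil => simp [PySem.Set.ofList_eq_foldl]
  | append_singleton fs x ih =>
    have hset : PySem.Set.ofList (fs ++ [x]) = PySem.Set.add (PySem.Set.ofList fs) x := by
      rw [PySem.Set.ofList_eq_foldl, PySem.Set.ofList_eq_foldl, List.foldl_append]
      rfl
    have hhead : ∀ a ∈ PySem.Set.ofList fs,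
        (pvOcc (fs ++ [x]) a).headD 0 = (pvOcc fs a).headD 0 := by
      intro a ha
      have hafs : a ∈ fs := (PySem.Set.mem_ofList _ _).mp ha
      rw [pvOcc_append]
      cases hocc : pvOcc fs a with
      | nil => exact absurd hocc (pvOcc_ne_nil hafs)
      | cons b l => simp
    rw [hset]
    by_cases hx : x ∈ PySem.Set.ofList fs
    · rw [PySem.Set.add_of_mem hx]
      refine ih.imp_of_mem ?_
      intro a b ha hb hab
      rw [hhead a ha, hhead b hb]; exact hab
    · rw [PySem.Set.add_of_not_mem hx]
      rw [List.pairwise_append]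
      refine ⟨ih.imp_of_mem (fun {a b} ha hb hab => by rw [hhead a ha, hhead b hb]; exact hab),
        by simp, ?_⟩
      intro a ha b hb
      have hb' : b = x := by simpa using hb
      rw [hb']
      have hafs : a ∈ fs := (PySem.Set.mem_ofList _ _).mp ha
      have hxfs : x ∉ fs := fun hc => hx ((PySem.Set.mem_ofList _ _).mpr hc)
      have hxocc : pvOcc fs x = [] := by
        by_contra hne
        obtain ⟨h0, h1, h2⟩ := mem_pvOcc.mp (headD_mem hne)
        exact hxfs (h2 ▸ pyGetD_mem h0 h1)
      rw [hhead a ha, pvOcc_append, hxocc]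
      simp only [beq_self_eq_true, if_true, List.nil_append, List.headD_cons]
      exact (pvOcc_bounds (headD_mem (pvOcc_ne_nil hafs))).2

lemma find?_pairwise {K : List Int} {p : Int → Bool} {R : Int → Int → Prop}
    (hpw : K.Pairwise R) {u : Int} (hu : K.find? p = some u) :
    ∀ v ∈ K, p v = true → R u v ∨ u = v := by
  induction K with
  | nil => simp at hu
  | cons h t ih =>
    rw [List.pairwise_cons] at hpw
    intro v hv hpv
    by_cases hh : p h
    · rw [List.find?_cons_of_pos hh] at hu
      cases hu
      rcases List.mem_cons.mp hv with rfl | hvt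
      · right; rfl
      · left; exact hpw.1 v hvt
    · rw [List.find?_cons_of_neg hh] at hu
      rcases List.mem_cons.mp hv with rfl | hvt
      · exact absurd hpv (by simpa using hh)
      · exact ih hpw.2 hu v hvt hpv

lemma mem_of_valid_in_fs {fs : List Int} {t : Int} (h : t ∈ fs) :
    ∃ i : Int, 0 ≤ i ∧ i < (fs.length : Int) ∧ PySem.List.pyGetD fs i 0 = t := by
  have := pvOcc_ne_nil h
  obtain ⟨h0, h1, h2⟩ := mem_pvOcc.mp (headD_mem this)
  exact ⟨_, h0, h1, h2⟩

lemma pvInnerA_spec (fs : List Int) (time : Int) :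
    ∀ (idxs : List Int) (k : Int), 0 ≤ k →
      k.toNat < (idxs.filter (fun i => decide (time ≤ PySem.List.pyGetD fs i 0))).length →
      ∃ k'', pvInnerA fs time idxs k =
        (some ((idxs.filter (fun i => decide (time ≤ PySem.List.pyGetD fs i 0))).getD k.toNat 0 + 1), k'') := by
  intro idxs
  induction idxs with
  | nil => intro k _ hlt; simp at hlt
  | cons i rest ih =>
    intro k hk hlt
    by_cases hp : time ≤ PySem.List.pyGetD fs i 0
    · rw [List.filter_cons_of_pos (by simpa using hp)] at hlt ⊢
      by_cases hk0 : k = 0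
      · subst hk0
        exact ⟨0, by simp [pvInnerA, hp]⟩
      · have hk1 : 1 ≤ k := by omega
        have h2 : (k - 1).toNat < (rest.filter (fun i => decide (time ≤ PySem.List.pyGetD fs i 0))).length := by
          simp only [List.length_cons] at hlt
          omega
        obtain ⟨k'', hrec⟩ := ih (k - 1) (by omega) h2
        refine ⟨k'', ?_⟩
        rw [show pvInnerA fs time (i :: rest) k = pvInnerA fs time rest (k - 1) by
          simp [pvInnerA, hp, hk0]]
        rw [hrec]
        have : (i :: rest.filter (fun i => decide (time ≤ PySem.List.pyGetD fs i 0))).getD k.toNat 0 =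
            (rest.filter (fun i => decide (time ≤ PySem.List.pyGetD fs i 0))).getD (k - 1).toNat 0 := by
          have : k.toNat = (k - 1).toNat + 1 := by omega
          rw [this]
          simp
        rw [this]
    · rw [List.filter_cons_of_neg (by simpa using hp)] at hlt ⊢
      obtain ⟨k'', hrec⟩ := ih k hk hlt
      exact ⟨k'', by rw [show pvInnerA fs time (i :: rest) k = pvInnerA fs time rest k by
        simp [pvInnerA, hp]]; exact hrec⟩

lemma pvLoopB_group (fs : List Int) (time : Int) :
    ∀ (G : List Int), (∀ g ∈ G, PySem.List.pyGetD fs g 0 = time) →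
      ∀ (Q' : List Int) (rem k : Int), 0 ≤ k →
        pvLoopB fs (G ++ Q') time rem k = pvLoopB fs Q' time (rem - (G.length : Int)) k := by
  intro G
  induction G with
  | nil => intro _ Q' rem k _; simp
  | cons g G' ih =>
    intro hG Q' rem k hk
    have hgt : PySem.List.pyGetD fs g 0 = time := hG g (by simp)
    have : pvLoopB fs ((g :: G') ++ Q') time rem k = pvLoopB fs (G' ++ Q') time (rem - 1) k := by
      show pvLoopB fs (g :: (G' ++ Q')) time rem k = _
      rw [pvLoopB]
      simp only [hgt, sub_self, zero_mul]
      rw [if_neg (by omega)]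
      norm_num
    rw [this, ih (fun g hg => hG g (by simp [hg])) Q' (rem - 1) k hk]
    congr 1
    simp only [List.length_cons]
    push_cast
    ring

def pvQual (fs : List Int) (t : Int) : List Int :=
  (PySem.List.pyRange 0 (fs.length : Int)).filter
    (fun i => decide (t ≤ PySem.List.pyGetD fs i 0))

lemma mem_pvQual {fs : List Int} {t i : Int} :
    i ∈ pvQual fs t ↔ 0 ≤ i ∧ i < (fs.length : Int) ∧ t ≤ PySem.List.pyGetD fs i 0 := by
  unfold pvQual
  simp [List.mem_filter, PySem.List.mem_pyRange_one, and_assoc]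

lemma pvQual_pairwise (fs : List Int) (t : Int) : (pvQual fs t).Pairwise (· < ·) := by
  exact (PySem.List.pairwise_lt_pyRange_one 0 _).sublist List.filter_sublist

lemma headD_le_of_mem_pairwise {l : List Int} (hpw : l.Pairwise (· < ·)) {x : Int}
    (hx : x ∈ l) : l.headD 0 ≤ x := by
  cases l with
  | nil => simp at hx
  | cons a t =>
    rw [List.pairwise_cons] at hpw
    rcases List.mem_cons.mp hx with rfl | hxt
    · simp
    · simpa using le_of_lt (hpw.1 x hxt)

lemma pyGet?_zero_headD {l : List Int} (h : l ≠ []) :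
    (PySem.List.pyGet? l 0).getD 0 = l.headD 0 := by
  cases l with
  | nil => simp at h
  | cons a t => simp [PySem.List.pyGet?, PySem.List.pyIdx?]

lemma pvMain (fs : List Int) (times : PySem.Dict Int (List Int))
    (hg : ∀ t, times.getD t [] = pvOcc fs t)
    (hk : times.keys = PySem.Set.ofList fs) :
    ∀ (keys Q : List Int) (k th : Int),
      keys.Pairwise (· < ·) →
      (∀ v ∈ keys, v ∈ fs) →
      (∀ v ∈ fs, v ∉ keys → ∀ t ∈ keys, v < t) →
      Q.Nodup →
      (∀ i ∈ Q, 0 ≤ i ∧ i < (fs.length : Int)) →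
      (∀ i : Int, 0 ≤ i → i < (fs.length : Int) →
        (PySem.List.pyGetD fs i 0 ∈ keys ↔ i ∈ Q)) →
      Q.Pairwise (fun a b => PySem.List.pyGetD fs a 0 ≤ PySem.List.pyGetD fs b 0) →
      pvOuterA fs times keys k (Q.length : Int) th = pvLoopB fs Q th (Q.length : Int) k := by
  intro keys
  induction keys with
  | nil =>
    intro Q k th _ _ _ _ hbounds hiff _
    have hQnil : Q = [] := by
      cases Q with
      | nil => rfl
      | cons q qs =>
        obtain ⟨h0, h1⟩ := hbounds q (by simp)
        have := (hiff q h0 h1).mpr (by simp)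
        simp at this
    subst hQnil
    rfl
  | cons time keys' ih =>
    intro Q k th hpw hkeysfs hmin hnd hbounds hiff hQpw
    have hpwc := List.pairwise_cons.mp hpw
    have htimefs : time ∈ fs := hkeysfs time (by simp)
    -- every plate in Q has its time ≥ time
    have hQkeys : ∀ i ∈ Q, PySem.List.pyGetD fs i 0 ∈ time :: keys' := by
      intro i hi
      obtain ⟨h0, h1⟩ := hbounds i hi
      exact (hiff i h0 h1).mpr hi
    have hgetime : ∀ i ∈ Q, time ≤ PySem.List.pyGetD fs i 0 := by
      intro i hi
      rcases List.mem_cons.mp (hQkeys i hi) with he | ht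
      · omega
      · exact le_of_lt (hpwc.1 _ ht)
    -- split Q into the block G of plates eaten at `time` and the rest Q'
    set pred := (fun i => PySem.List.pyGetD fs i 0 == time) with hpred
    set G := Q.takeWhile pred with hG
    set Q' := Q.dropWhile pred with hQ'
    have hsplit : Q = G ++ Q' := (List.takeWhile_append_dropWhile).symm
    have hGtime : ∀ g ∈ G, PySem.List.pyGetD fs g 0 = time := by
      intro g hgm
      have := List.mem_takeWhile_imp hgm
      simpa [hpred] using this
    have hQ'sub : Q'.Sublist Q := List.dropWhile_sublist _
    have hGsub : G.Sublist Q := List.takeWhile_sublist _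
    have hQ'netime : ∀ q ∈ Q', PySem.List.pyGetD fs q 0 ≠ time := by
      cases hQ'c : Q' with
      | nil => simp
      | cons q0 qs =>
        have hq0 : ¬ (pred q0 = true) := by
          have := List.head?_dropWhile_not pred Q
          rw [← hQ', hQ'c] at this
          simpa using this
        have hq0ne : PySem.List.pyGetD fs q0 0 ≠ time := by simpa [hpred] using hq0
        intro q hq
        have hQ'pw : (q0 :: qs).Pairwise
            (fun a b => PySem.List.pyGetD fs a 0 ≤ PySem.List.pyGetD fs b 0) := by
          rw [← hQ'c]
          exact hQpw.sublist hQ'sub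
        rcases List.mem_cons.mp hq with rfl | hqs
        · exact hq0ne
        · have h1 : PySem.List.pyGetD fs q0 0 ≤ PySem.List.pyGetD fs q 0 :=
            (List.pairwise_cons.mp hQ'pw).1 q hqs
          have h2 : time ≤ PySem.List.pyGetD fs q0 0 :=
            hgetime q0 (hQ'sub.mem (by rw [hQ'c]; simp))
          have h3 : q0 ∈ Q := hQ'sub.mem (by rw [hQ'c]; simp)
          intro hcon
          omega
    have hGocc_mem : ∀ i : Int, i ∈ G ↔ i ∈ pvOcc fs time := by
      intro i
      constructor
      · intro hi
        have hiQ : i ∈ Q := hGsub.mem hi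
        obtain ⟨h0, h1⟩ := hbounds i hiQ
        exact mem_pvOcc.mpr ⟨h0, h1, hGtime i hi⟩
      · intro hi
        obtain ⟨h0, h1, h2⟩ := mem_pvOcc.mp hi
        have hiQ : i ∈ Q := (hiff i h0 h1).mp (by rw [h2]; simp)
        rw [hsplit] at hiQ
        rcases List.mem_append.mp hiQ with h | h
        · exact h
        · exact absurd h2 (hQ'netime i h)
    have hGnd : G.Nodup := hnd.sublist hGsub
    have hOnd : (pvOcc fs time).Nodup := (pvOcc_pairwise fs time).imp (fun h => ne_of_lt h)
    have hGperm : G.Perm (pvOcc fs time) :=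
      (List.perm_ext_iff_of_nodup hGnd hOnd).mpr hGocc_mem
    have hGlen : G.length = (pvOcc fs time).length := hGperm.length_eq
    have hGne : G ≠ [] := by
      intro hGnil
      obtain ⟨j, hj0, hj1, hj2⟩ := mem_of_valid_in_fs htimefs
      have hjQ : j ∈ Q := (hiff j hj0 hj1).mp (by rw [hj2]; simp)
      rw [hsplit, hGnil, List.nil_append] at hjQ
      exact hQ'netime j hjQ hj2
    have hlenQ : Q.length = G.length + Q'.length := by
      rw [hsplit, List.length_append]
    -- unfold A one step
    rw [pvOuterA]
    set l := (Q.length : Int) with hl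
    by_cases hfit : 0 ≤ k - (time - th) * l
    · rw [if_pos hfit]
      -- B eats the whole block G
      obtain ⟨g, G'', hGc⟩ := List.exists_cons_of_ne_nil hGne
      have hQc : Q = g :: (G'' ++ Q') := by rw [hsplit, hGc]; rfl
      have hBgroup : pvLoopB fs Q th l k =
          pvLoopB fs Q' time ((Q'.length : Int)) (k - (time - th) * l) := by
        conv_lhs => rw [hQc]
        rw [pvLoopB]
        simp only [hGtime g (by rw [hGc]; simp)]
        rw [if_neg (by omega)]
        rw [pvLoopB_group fs time G'' (fun g' hg' => hGtime g' (by rw [hGc]; simp [hg'])) Q'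
          (l - 1) (k - (time - th) * l) (by omega)]
        congr 1
        have : G.length = G''.length + 1 := by rw [hGc]; simp
        omega
      rw [hBgroup]
      -- A recurses with the same state
      have harith1 : l - ((times.getD time []).length : Int) = (Q'.length : Int) := by
        rw [hg]
        omega
      have harith2 : th + (time - th) = time := by ring
      rw [harith1, harith2]
      -- invariants for the tail
      have htimenotin : time ∉ keys' := by
        intro hc
        exact absurd (hpwc.1 time hc) (lt_irrefl time)
      refine ih Q' (k - (time - th) * l) time hpwc.2
        (fun v hv => hkeysfs v (by simp [hv])) ?_ (hnd.sublist hQ'sub) ?_ ?_ (hQpw.sublist hQ'sub)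
      · intro v hv hnotin t' ht'
        by_cases hvk : v ∈ time :: keys'
        · rcases List.mem_cons.mp hvk with rfl | h
          · exact hpwc.1 t' ht'
          · exact absurd h hnotin
        · exact hmin v hv hvk t' (by simp [ht'])
      · intro i hi
        exact hbounds i (hQ'sub.mem hi)
      · intro i h0 h1
        constructor
        · intro hkey
          have hiQ : i ∈ Q := (hiff i h0 h1).mp (by simp [hkey])
          rw [hsplit] at hiQ
          rcases List.mem_append.mp hiQ with h | h
          · exfalso
            have := hGtime i h
            rw [this] at hkey
            exact htimenotin hkey
          · exact h
        · intro hi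
          have hiQ : i ∈ Q := hQ'sub.mem hi
          have := hQkeys i hiQ
          rcases List.mem_cons.mp this with he | ht
          · exact absurd he (hQ'netime i hi)
          · exact ht
    · rw [if_neg hfit]
      -- the break happens now, at the first plate of the block
      have hQne : Q ≠ [] := by
        rw [hsplit]
        intro hc
        rcases List.append_eq_nil_iff.mp hc with ⟨h1, _⟩
        exact hGne h1
      have hlpos : 0 < l := by
        have := List.length_pos_iff.mpr hQne
        omega
      set k' := PySem.Int.mod k l with hk'
      have hk'0 : 0 ≤ k' := PySem.Int.mod_nonneg k hlpos
      have hk'lt : k' < l := PySem.Int.mod_lt k hlpos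
      -- the sorted remaining plates are exactly the qualifying indices, in order
      have hqual_pw := pvQual_pairwise fs time
      have hqualnd : (pvQual fs time).Nodup := hqual_pw.imp (fun h => ne_of_lt h)
      have hqualQ : (pvQual fs time).Perm Q := by
        rw [List.perm_ext_iff_of_nodup hqualnd hnd]
        intro i
        rw [mem_pvQual]
        constructor
        · rintro ⟨h0, h1, h2⟩
          apply (hiff i h0 h1).mp
          by_contra hnotin
          have := hmin (PySem.List.pyGetD fs i 0) (pyGetD_mem h0 h1) hnotin time (by simp)
          omega
        · intro hi
          obtain ⟨h0, h1⟩ := hbounds i hi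
          exact ⟨h0, h1, hgetime i hi⟩
      have hquallen : (pvQual fs time).length = Q.length := hqualQ.length_eq
      have hsorted : PySem.List.sorted Q (fun x => x) = pvQual fs time :=
        PySem.List.sorted_eq_of_perm_of_pairwise_lt Q (pvQual fs time) _ hqualQ hqual_pw
      have hqualne : pvQual fs time ≠ [] := by
        intro hc
        rw [hc] at hquallen
        exact hQne (List.length_eq_zero_iff.mp hquallen.symm)
      set m := (pvQual fs time).headD 0 with hm
      have hmmem : m ∈ pvQual fs time := headD_mem hqualne
      have hmmin : ∀ i ∈ pvQual fs time, m ≤ i := fun i hi => headD_le_of_mem_pairwise hqual_pw hi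
      obtain ⟨hm0, hm1, hm2⟩ := mem_pvQual.mp hmmem
      -- the dict scan finds a key u whose first occurrence is ≤ m
      have hfind : ∃ u, times.keys.find? (fun v => decide (time ≤ v)) = some u := by
        have : (times.keys.find? (fun v => decide (time ≤ v))).isSome := by
          rw [List.find?_isSome]
          exact ⟨time, by rw [hk]; exact (PySem.Set.mem_ofList _ _).mpr htimefs, by simp⟩
        exact Option.isSome_iff_exists.mp this
      obtain ⟨u, hu⟩ := hfind
      have humem : u ∈ times.keys := List.mem_of_find?_eq_some hu
      have hufs : u ∈ fs := by
        rw [hk] at humem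
        exact (PySem.Set.mem_ofList _ _).mp humem
      have hup : time ≤ u := by simpa using List.find?_some hu
      set v := PySem.List.pyGetD fs m 0 with hv
      have hvfs : v ∈ fs := pyGetD_mem hm0 hm1
      have hR := find?_pairwise (R := fun a b => (pvOcc fs a).headD 0 < (pvOcc fs b).headD 0)
        (by rw [hk]; exact ofList_pairwise_headOcc fs) hu v
        (by rw [hk]; exact (PySem.Set.mem_ofList _ _).mpr hvfs) (by simp [hm2])
      have hocv : m ∈ pvOcc fs v := mem_pvOcc.mpr ⟨hm0, hm1, rfl⟩
      have hheadv : (pvOcc fs v).headD 0 ≤ m := headD_le_of_mem_pairwise (pvOcc_pairwise fs v) hocv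
      have hheadu : (pvOcc fs u).headD 0 ≤ m := by
        rcases hR with h | h
        · omega
        · rw [h]; exact hheadv
      set idex := (pvOcc fs u).headD 0 with hidex
      have huocc_ne : pvOcc fs u ≠ [] := pvOcc_ne_nil hufs
      have hidexmem : idex ∈ pvOcc fs u := headD_mem huocc_ne
      obtain ⟨hidex0, hidex1, _⟩ := mem_pvOcc.mp hidexmem
      -- the scan from idex sees exactly the qualifying indices
      have hfilter : (PySem.List.pyRange idex (fs.length : Int)).filter
          (fun i => decide (time ≤ PySem.List.pyGetD fs i 0)) = pvQual fs time := by
        have hsplitr := PySem.List.pyRange_one_append 0 idex (fs.length : Int) hidex0 (by omega)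
        have : pvQual fs time =
            (PySem.List.pyRange 0 idex).filter (fun i => decide (time ≤ PySem.List.pyGetD fs i 0)) ++
            (PySem.List.pyRange idex (fs.length : Int)).filter (fun i => decide (time ≤ PySem.List.pyGetD fs i 0)) := by
          rw [pvQual, hsplitr, List.filter_append]
        rw [this]
        have hnil : (PySem.List.pyRange 0 idex).filter
            (fun i => decide (time ≤ PySem.List.pyGetD fs i 0)) = [] := by
          rw [List.filter_eq_nil_iff]
          intro i hi
          rw [PySem.List.mem_pyRange_one] at hi
          simp only [decide_eq_true_eq]
          intro hcon
          have hiq : i ∈ pvQual fs time := mem_pvQual.mpr ⟨hi.1, by omega, hcon⟩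
          have := hmmin i hiq
          omega
        rw [hnil, List.nil_append]
      -- run the inner scan
      have hk'nat : k'.toNat < ((PySem.List.pyRange idex (fs.length : Int)).filter
          (fun i => decide (time ≤ PySem.List.pyGetD fs i 0))).length := by
        rw [hfilter, hquallen]
        omega
      obtain ⟨k'', hinner⟩ := pvInnerA_spec fs time _ k' hk'0 hk'nat
      -- both sides compute qual[k'] + 1
      show (match pvInnerA fs time (PySem.List.pyRange
          (((times.keys.find? (fun v => decide (time ≤ v))).map
            (fun u => (PySem.List.pyGet? (times.getD u []) 0).getD 0)).getD 0)
          (fs.length : Int)) (PySem.Int.mod k l) with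
        | (some r, _) => r
        | (none, k'') => pvOuterA fs times keys' k'' l th) = pvLoopB fs Q th l k
      have hidexeq : ((times.keys.find? (fun v => decide (time ≤ v))).map
          (fun u => (PySem.List.pyGet? (times.getD u []) 0).getD 0)).getD 0 = idex := by
        rw [hu]
        simp only [Option.map_some, Option.getD_some]
        rw [hg, pyGet?_zero_headD huocc_ne]
      rw [hidexeq, ← hk', hinner]
      -- B's side
      obtain ⟨g, G'', hGc⟩ := List.exists_cons_of_ne_nil hGne
      have hQc : Q = g :: (G'' ++ Q') := by rw [hsplit, hGc]; rfl
      conv_rhs => rw [hQc]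
      rw [pvLoopB]
      simp only [hGtime g (by rw [hGc]; simp)]
      rw [if_pos (by omega)]
      rw [← hQc, hsorted, hfilter]
      rw [PySem.List.pyGetD_of_nonneg _ _ hk'0]

theorem solution_eq (fs : List Int) (k : Int) : solution fs k = solution_alt fs k := by
  unfold solution solution_alt
  set P := PySem.List.sorted (PySem.List.pyRange 0 (fs.length : Int))
    (fun i => PySem.List.pyGetD fs i 0) with hP
  have hPperm : P.Perm (PySem.List.pyRange 0 (fs.length : Int)) := PySem.List.sorted_perm _ _ _
  have hPlen : (P.length : Int) = (fs.length : Int) := by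
    rw [hPperm.length_eq, PySem.List.length_pyRange_one]
    omega
  have hPmem : ∀ i : Int, i ∈ P ↔ (0 ≤ i ∧ i < (fs.length : Int)) := by
    intro i
    rw [hPperm.mem_iff, PySem.List.mem_pyRange_one]
  have hkeys := pvBuildA_keys fs
  show pvOuterA fs (pvBuildA fs) (PySem.List.sorted (pvBuildA fs).keys (fun x => x)) k (↑fs.length) 0 = _
  rw [hkeys]
  have := pvMain fs (pvBuildA fs) (pvBuildA_getD fs) hkeys
    (PySem.List.sorted (PySem.Set.ofList fs) (fun x => x)) P k 0
    (PySem.List.sorted_ofList_pairwise_lt fs)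
    (fun v hv => (PySem.Set.mem_ofList _ _).mp ((PySem.List.mem_sorted _ _ _ _).mp hv))
    (fun v hv hnotin => absurd ((PySem.List.mem_sorted _ _ _ _).mpr
      ((PySem.Set.mem_ofList _ _).mpr hv)) hnotin)
    (hPperm.nodup_iff.mpr (PySem.List.nodup_pyRange_one 0 _))
    (fun i hi => (hPmem i).mp hi)
    (fun i h0 h1 => ⟨fun _ => (hPmem i).mpr ⟨h0, h1⟩,
      fun _ => (PySem.List.mem_sorted _ _ _ _).mpr
        ((PySem.Set.mem_ofList _ _).mpr (pyGetD_mem h0 h1))⟩)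
    (PySem.List.sorted_pairwise _ _)
  rw [hPlen] at this
  exact this

-- ===== VERDICT (by name: the statement is the Claim_ definition above) =====
theorem solution_spec : Claim_equal_solution := by
  intro food_times k _
  unfold Spec_solution
  exact solution_eq food_times k
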